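-- pv_equiv track=rewrite | github.com/ardzz/dasar-pemrogaman-2 | words.py | count_each_consonant_from_sentence
-- ===== SOURCE A (Python) =====
-- def count_each_consonant_from_sentence(sentence: str) -> dict:
--     consonant = "bcdfghjklmnpqrstvwxyz"
--     count = {}
--     for char in sentence:
--         if char in consonant:
--             if char in count:
--                 count[char] += 1
--             else:
--                 count[char] = 1
--     return count
-- ===== SOURCE B (Python) =====
-- def count_each_consonant_from_sentence(sentence: str) -> dict:
--     consonant = "bcdfghjklmnpqrstvwxyz"
--     if not sentence:
--         return {}
--     c = sentence[0]
--     rest = sentence.replace(c, "")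
--     tail_counts = count_each_consonant_from_sentence(rest)
--     if c in consonant:
--         return {c: len(sentence) - len(rest), **tail_counts}
--     return tail_counts
-- ===== Notes on version B (the rewrite author's own statement) =====
-- stated objective: alternative
-- what changed: Replaces the single-pass dict of running counters by a recursion that takes the first character, counts it as the length drop after str.replace removes every copy of it, and recurses on the shortened string, so no dictionary accumulation or membership bookkeeping is ever performed.
import Mathlib
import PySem

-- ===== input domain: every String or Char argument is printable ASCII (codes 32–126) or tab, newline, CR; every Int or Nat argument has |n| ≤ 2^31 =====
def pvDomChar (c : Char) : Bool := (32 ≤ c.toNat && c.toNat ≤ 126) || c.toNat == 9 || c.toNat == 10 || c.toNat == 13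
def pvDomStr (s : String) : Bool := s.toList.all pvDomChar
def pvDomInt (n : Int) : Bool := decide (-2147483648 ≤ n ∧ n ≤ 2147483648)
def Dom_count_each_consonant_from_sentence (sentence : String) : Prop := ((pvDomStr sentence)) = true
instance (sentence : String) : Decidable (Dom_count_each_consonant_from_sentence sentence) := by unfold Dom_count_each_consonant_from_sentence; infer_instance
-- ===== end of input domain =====

-- B replaces A's single-pass dict of running counters by a recursion with no dict at all: take the
-- first character, count it as the length drop when str.replace removes all its copies, recurse on the
-- shortened string; objective: alternative (different algorithm/data structure, similar cost).

-- ===== PORT A =====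
def count_each_consonant_from_sentence (sentence : String) : List (String × Int) :=
  let consonant : String := "bcdfghjklmnpqrstvwxyz"
  (sentence.toList.foldl
    (fun (count : PySem.Dict Char Int) char =>
      if PySem.Str.isIn (String.ofList [char]) consonant then
        if count.contains char then count.insert char (count.getD char 0 + 1)
        else count.insert char 1
      else count)
    PySem.Dict.empty).items.map (fun p => (String.ofList [p.1], p.2))

-- ===== PORT B =====
-- recursive core of Source B on the character list: head char c, rest = the list with every copy of c
-- removed (str.replace ported as filter (· != c)), count of c = length drop, recurse on rest
def pvAltGo (l : List Char) : List (Char × Int) :=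
  match l with
  | [] => []
  | c :: t =>
    let rest := (c :: t).filter (fun x => x != c)
    let tail := pvAltGo rest
    if PySem.Str.isIn (String.ofList [c]) "bcdfghjklmnpqrstvwxyz" then
      (c, ((c :: t).length : Int) - (rest.length : Int)) :: tail
    else tail
termination_by l.length
decreasing_by
  simp only [List.filter_cons, bne_self_eq_false, List.length_cons]
  split
  · simp_all
  · exact Nat.lt_succ_of_le (List.length_filter_le _ _)

def count_each_consonant_from_sentence_alt (sentence : String) : List (String × Int) :=
  (pvAltGo sentence.toList).map (fun p => (String.ofList [p.1], p.2))

-- ===== PRECONDITION & SPEC =====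
def Spec_count_each_consonant_from_sentence (sentence : String) (out : List (String × Int)) : Prop := out = count_each_consonant_from_sentence_alt sentence
instance (sentence : String) (out : List (String × Int)) : Decidable (Spec_count_each_consonant_from_sentence sentence out) := by unfold Spec_count_each_consonant_from_sentence; infer_instance

-- ===== CLAIM (what is proved, stated in full; the proofs are below) =====
def Claim_equal_count_each_consonant_from_sentence : Prop := ∀ (sentence : String), Dom_count_each_consonant_from_sentence sentence → Spec_count_each_consonant_from_sentence sentence (count_each_consonant_from_sentence sentence)

-- ===== LEMMAS AND PROOFS =====

-- A's two-branch body is insert (getD + 1)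
theorem a_body_eq (d : PySem.Dict Char Int) (c : Char) :
    (if d.contains c then d.insert c (d.getD c 0 + 1) else d.insert c 1)
      = d.insert c (d.getD c 0 + 1) := by
  by_cases h : d.contains c = true
  · rw [if_pos h]
  · have h' : d.contains c = false := Bool.eq_false_iff.mpr h
    rw [if_neg (by simp [h']), PySem.Dict.getD_of_not_contains d _ h']
    norm_num

-- occurrences of c + survivors of removing c = length
theorem count_add_filter_ne (t : List Char) (c : Char) :
    t.count c + (t.filter (fun x => x != c)).length = t.length := by
  rw [← List.countP_eq_length_filter, List.count]
  rw [List.length_eq_countP_add_countP (l := t) (p := fun x => x == c)]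
  congr 1
  exact List.countP_congr (fun x _ => by simp [bne])

-- first-occurrence dedup peels the head: Set.ofList (c :: xs) = c :: Set.ofList (xs without c)
theorem set_ofList_cons (c : Char) (xs : List Char) :
    PySem.Set.ofList (c :: xs) = c :: PySem.Set.ofList (xs.filter (fun x => x != c)) := by
  induction xs using List.reverseRecOn with
  | nil => rfl
  | append_singleton ys y ih =>
    rw [show c :: (ys ++ [y]) = (c :: ys) ++ [y] from rfl,
        PySem.Set.ofList_append_singleton, ih, List.filter_append]
    by_cases hy : y = c
    · subst hy
      simp [PySem.Set.add]
    · have hy' : List.filter (fun x => x != c) [y] = [y] := by simp [hy]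
      rw [hy', PySem.Set.ofList_append_singleton]
      by_cases hm : y ∈ PySem.Set.ofList (ys.filter (fun x => x != c))
      · simp [PySem.Set.add, hm, hy]
      · simp [PySem.Set.add, hm, hy]
theorem pvAltGo_eq : ∀ (n : Nat) (l : List Char), l.length ≤ n →
    pvAltGo l = (PySem.Set.ofList (l.filter (fun ch => PySem.Str.isIn (String.ofList [ch]) "bcdfghjklmnpqrstvwxyz"))).map
      (fun k => (k, (List.count k (l.filter (fun ch => PySem.Str.isIn (String.ofList [ch]) "bcdfghjklmnpqrstvwxyz")) : Int))) := by
  intro n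
  induction n with
  | zero =>
    intro l h
    have : l = [] := List.length_eq_zero_iff.mp (Nat.le_zero.mp h)
    subst this
    rw [pvAltGo]
    rfl
  | succ m ih =>
    intro l h
    cases l with
    | nil => rw [pvAltGo]; rfl
    | cons c t =>
      have hrest : (c :: t).filter (fun x => x != c) = t.filter (fun x => x != c) := by
        simp only [List.filter_cons, bne_self_eq_false, if_false, Bool.false_eq_true]
      have hlen : ((c :: t).filter (fun x => x != c)).length ≤ m := by
        rw [hrest]
        have := List.length_filter_le (fun x => x != c) t
        simp only [List.length_cons] at h
        omega
      have hIH := ih _ hlen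
      have hcomm : (((c :: t).filter (fun x => x != c)).filter (fun ch => PySem.Str.isIn (String.ofList [ch]) "bcdfghjklmnpqrstvwxyz")) = ((t.filter (fun ch => PySem.Str.isIn (String.ofList [ch]) "bcdfghjklmnpqrstvwxyz")).filter (fun x => x != c)) := by
        rw [hrest, List.filter_filter, List.filter_filter]
        exact List.filter_congr (fun x _ => Bool.and_comm _ _)
      by_cases hc : PySem.Str.isIn (String.ofList [c]) "bcdfghjklmnpqrstvwxyz" = true
      · have hfc : (c :: t).filter (fun ch => PySem.Str.isIn (String.ofList [ch]) "bcdfghjklmnpqrstvwxyz") = c :: t.filter (fun ch => PySem.Str.isIn (String.ofList [ch]) "bcdfghjklmnpqrstvwxyz") := by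
          simp only [List.filter_cons]
          rw [if_pos (by simpa using hc)]
        rw [pvAltGo]
        simp only [if_pos hc]
        rw [hIH, hcomm, hfc, set_ofList_cons, List.map_cons]
        congr 1
        · have hcf : List.count c (t.filter (fun ch => PySem.Str.isIn (String.ofList [ch]) "bcdfghjklmnpqrstvwxyz")) = List.count c t := List.count_filter hc
          have hl : t.count c + (t.filter (fun x => x != c)).length = t.length := count_add_filter_ne t c
          rw [hrest]
          simp only [List.length_cons, List.count_cons_self, hcf]
          congr 1
          push_cast
          omega
        · apply List.map_congr_left
          intro k hk
          have hk' : k ∈ (t.filter (fun ch => PySem.Str.isIn (String.ofList [ch]) "bcdfghjklmnpqrstvwxyz")).filter (fun x => x != c) := (PySem.Set.mem_ofList _ _).mp hk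
          have hkc : (k != c) = true := (List.mem_filter.mp hk').2
          have h1 : List.count k ((t.filter (fun ch => PySem.Str.isIn (String.ofList [ch]) "bcdfghjklmnpqrstvwxyz")).filter (fun x => x != c)) = List.count k (t.filter (fun ch => PySem.Str.isIn (String.ofList [ch]) "bcdfghjklmnpqrstvwxyz")) :=
            List.count_filter hkc
          have h2 : List.count k (c :: t.filter (fun ch => PySem.Str.isIn (String.ofList [ch]) "bcdfghjklmnpqrstvwxyz")) = List.count k (t.filter (fun ch => PySem.Str.isIn (String.ofList [ch]) "bcdfghjklmnpqrstvwxyz")) := by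
            simp only [bne_iff_ne] at hkc
            simp [Ne.symm hkc]
          rw [h1, h2]
      · have hfc : (c :: t).filter (fun ch => PySem.Str.isIn (String.ofList [ch]) "bcdfghjklmnpqrstvwxyz") = t.filter (fun ch => PySem.Str.isIn (String.ofList [ch]) "bcdfghjklmnpqrstvwxyz") := by
          simp only [List.filter_cons]
          rw [if_neg (by simpa using hc)]
        have hself : (t.filter (fun ch => PySem.Str.isIn (String.ofList [ch]) "bcdfghjklmnpqrstvwxyz")).filter (fun x => x != c) = t.filter (fun ch => PySem.Str.isIn (String.ofList [ch]) "bcdfghjklmnpqrstvwxyz") := by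
          apply List.filter_eq_self.mpr
          intro a ha
          have hpa : (fun ch => PySem.Str.isIn (String.ofList [ch]) "bcdfghjklmnpqrstvwxyz") a = true := (List.mem_filter.mp ha).2
          simp only [bne_iff_ne]
          intro hac
          rw [hac] at hpa
          exact hc hpa
        rw [pvAltGo]
        simp only [if_neg hc]
        rw [hIH, hcomm, hself, hfc]

-- ===== VERDICT (by name: the statement is the Claim_ definition above) =====
theorem count_each_consonant_from_sentence_spec : Claim_equal_count_each_consonant_from_sentence := by
  intro sentence _
  unfold Spec_count_each_consonant_from_sentence
  unfold count_each_consonant_from_sentence count_each_consonant_from_sentence_alt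
  simp only []
  rw [show (fun (count : PySem.Dict Char Int) char =>
        if PySem.Str.isIn (String.ofList [char]) "bcdfghjklmnpqrstvwxyz" then
          if count.contains char then count.insert char (count.getD char 0 + 1)
          else count.insert char 1
        else count)
      = (fun (count : PySem.Dict Char Int) char =>
          if PySem.Str.isIn (String.ofList [char]) "bcdfghjklmnpqrstvwxyz" then
            count.insert char (count.getD char 0 + 1)
          else count) from
    funext fun d => funext fun c => by rw [a_body_eq d c]]
  rw [← List.foldl_filter (p := fun ch => PySem.Str.isIn (String.ofList [ch]) "bcdfghjklmnpqrstvwxyz")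
        (f := fun (count : PySem.Dict Char Int) char => count.insert char (count.getD char 0 + 1))]
  rw [PySem.Dict.foldl_insert_getD_add_one_eq_counter, PySem.Dict.items_counter]
  congr 1
  exact (pvAltGo_eq sentence.toList.length sentence.toList (le_refl _)).symm
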